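-- pv_equiv track=rewrite | github.com/luk036/csd-py | src/csd_py/csd.py | to_decimal_i
-- ===== SOURCE A (Python) =====
-- def to_decimal_i(csd: str) -> int:
--     """Convert the argument to a decimal number
--
--     Original author: Harnesser
--     <https://sourceforge.net/projects/pycsd/>
--     License: GPL2
--
--     Args:
--         csd (str): string containing the CSD value
--
--     Returns:
--         float: decimal value of the CSD format
--
--     Examples:
--         >>> to_decimal_i("+00-00")
--         28
--     """
--     num: int = 0
--     for digit in csd:
--         if digit == "0":
--             num *= 2
--         elif digit == "+":
--             num = num * 2 + 1
--         elif digit == "-":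
--             num = num * 2 - 1
--         else:
--             pass  # ignore other characters
--     return num
-- ===== SOURCE B (Python) =====
-- def to_decimal_i(csd: str) -> int:
--     table = {"+": 1, "-": -1, "0": 0}
--     vals = [table[c] for c in csd if c in table]
--     return sum(v << i for i, v in enumerate(reversed(vals)))
-- ===== Notes on version B (the rewrite author's own statement) =====
-- stated objective: alternative
-- what changed: Replaces the left-to-right Horner accumulation with a filter pass extracting digit values followed by a positional weighted sum (v << i) over the reversed digit list; the comprehension/sum pipeline avoids A's per-character interpreted branch chain.
import Mathlib
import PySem

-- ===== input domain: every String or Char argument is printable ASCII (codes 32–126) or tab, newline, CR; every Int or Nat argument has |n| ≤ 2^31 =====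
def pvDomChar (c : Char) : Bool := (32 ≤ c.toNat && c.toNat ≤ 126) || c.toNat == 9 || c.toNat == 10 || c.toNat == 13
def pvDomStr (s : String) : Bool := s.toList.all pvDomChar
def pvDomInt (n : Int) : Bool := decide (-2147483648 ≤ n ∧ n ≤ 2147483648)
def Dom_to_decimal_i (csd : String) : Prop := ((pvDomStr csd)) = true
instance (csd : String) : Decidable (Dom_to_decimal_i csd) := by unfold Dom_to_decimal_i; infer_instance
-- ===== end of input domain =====

-- B replaces A's left-to-right Horner accumulation by a filter pass extracting digit
-- values plus a positional weighted sum over the reversed digit list (alternative decomposition).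


-- ===== PORT A =====
def to_decimal_i (csd : String) : Int :=
  csd.toList.foldl (fun num digit =>
    if digit = '0' then num * 2
    else if digit = '+' then num * 2 + 1
    else if digit = '-' then num * 2 - 1
    else num) 0

-- ===== PORT B =====
-- table lookup / membership filter of Source B, as a filterMap
def pvCsdVal (c : Char) : Option Int :=
  if c = '+' then some 1 else if c = '-' then some (-1) else if c = '0' then some 0 else none

def to_decimal_i_alt (csd : String) : Int :=
  let vals := csd.toList.filterMap pvCsdVal
  ((PySem.List.enumerate vals.reverse 0).map (fun p => p.2 * 2 ^ p.1.toNat)).sum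

-- ===== PRECONDITION & SPEC =====
def Spec_to_decimal_i (csd : String) (out : Int) : Prop := out = to_decimal_i_alt csd
instance (csd : String) (out : Int) : Decidable (Spec_to_decimal_i csd out) := by unfold Spec_to_decimal_i; infer_instance

-- ===== CLAIM (what is proved, stated in full; the proofs are below) =====
def Claim_equal_to_decimal_i : Prop := ∀ (csd : String), Dom_to_decimal_i csd → Spec_to_decimal_i csd (to_decimal_i csd)

-- ===== LEMMAS AND PROOFS =====

-- weighted sum of an enumeration starting at s
def pvE (xs : List Int) (s : Nat) : Int :=
  ((PySem.List.enumerate xs (s : Int)).map (fun p => p.2 * 2 ^ p.1.toNat)).sum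

lemma pvE_succ (xs : List Int) : ∀ s : Nat, pvE xs (s + 1) = 2 * pvE xs s := by
  induction xs with
  | nil => intro s; simp [pvE, PySem.List.enumerate_nil]
  | cons x xs ih =>
    intro s
    have h1 := ih (s + 1)
    simp [pvE, PySem.List.enumerate_cons] at h1 ⊢
    rw [h1]; ring

lemma pvE_cons (x : Int) (xs : List Int) : pvE (x :: xs) 0 = x + 2 * pvE xs 0 := by
  have := pvE_succ xs 0
  simp [pvE, PySem.List.enumerate_cons] at this ⊢
  omega

lemma pv_main (l : List Char) :
    l.foldl (fun num digit =>
      if digit = '0' then num * 2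
      else if digit = '+' then num * 2 + 1
      else if digit = '-' then num * 2 - 1
      else num) 0
    = pvE (l.filterMap pvCsdVal).reverse 0 := by
  induction l using List.reverseRecOn with
  | nil => simp [pvE, PySem.List.enumerate_nil]
  | append_singleton l c ih =>
    rw [List.foldl_append, List.filterMap_append]
    simp only [List.foldl_cons, List.foldl_nil]
    by_cases h0 : c = '0'
    · subst h0
      simp [pvCsdVal, pvE_cons, ih]; ring
    · by_cases hp : c = '+'
      · subst hp
        simp [pvCsdVal, pvE_cons, ih]; ring
      · by_cases hm : c = '-'
        · subst hm
          simp [pvCsdVal, pvE_cons, ih]; ring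
        · simp [pvCsdVal, h0, hp, hm, ih]

-- ===== VERDICT (by name: the statement is the Claim_ definition above) =====
theorem to_decimal_i_spec : Claim_equal_to_decimal_i := by
  intro csd _
  unfold Spec_to_decimal_i to_decimal_i to_decimal_i_alt
  simpa [pvE] using pv_main csd.toList
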